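-- pv_equiv track=rewrite | github.com/RiceDefender/CelebrityProfilingBachelorThesis | Preprocessing/aggregation.py | build_text_from_followers
-- ===== SOURCE A (Python) =====
-- from typing import Any, Dict, List, Optional
--
-- def build_text_from_followers(
--     follower_groups: List[List[str]],
--     tweet_sep: str,
--     follower_sep: str,
--     max_followers: Optional[int] = None,
--     max_tweets_per_follower: Optional[int] = None,
--     max_chars: Optional[int] = 10000,
-- ) -> str:
--     parts: List[str] = []
--     current_len = 0
--
--     selected_followers = follower_groups[:max_followers] if max_followers is not None else follower_groups
--
--     for follower_idx, tweets in enumerate(selected_followers):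
--         selected_tweets = tweets[:max_tweets_per_follower] if max_tweets_per_follower is not None else tweets
--         clean_tweets = [t for t in selected_tweets if isinstance(t, str) and t.strip()]
--
--         if not clean_tweets:
--             continue
--
--         if parts:
--             sep = f" {follower_sep} "
--             if max_chars is not None and current_len + len(sep) > max_chars:
--                 break
--             parts.append(sep)
--             current_len += len(sep)
--
--         for tweet_idx, tweet in enumerate(clean_tweets):
--             if tweet_idx > 0:
--                 sep = f" {tweet_sep} "
--                 if max_chars is not None and current_len + len(sep) > max_chars:
--                     return "".join(parts).strip()
--                 parts.append(sep)
--                 current_len += len(sep)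
--
--             if max_chars is not None and current_len + len(tweet) > max_chars:
--                 remaining = max_chars - current_len
--                 if remaining > 0:
--                     parts.append(tweet[:remaining])
--                 return "".join(parts).strip()
--
--             parts.append(tweet)
--             current_len += len(tweet)
--
--     return "".join(parts).strip()
-- ===== SOURCE B (Python) =====
-- from typing import List, Optional, Tuple
--
--
-- def build_text_from_followers(
--     follower_groups: List[List[str]],
--     tweet_sep: str,
--     follower_sep: str,
--     max_followers: Optional[int] = None,
--     max_tweets_per_follower: Optional[int] = None,
--     max_chars: Optional[int] = 10000,
-- ) -> str:
--     # Measure-then-assemble: flatten to a piece list, find the cut index and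
--     # offset by pure length arithmetic, then build the text with ONE join and
--     # ONE slice (no budget-tracked buffer, no conditional appends).
--     fs = f" {follower_sep} "
--     ts = f" {tweet_sep} "
--
--     selected = follower_groups[:max_followers] if max_followers is not None else follower_groups
--     cleaned = [
--         [t for t in (g[:max_tweets_per_follower] if max_tweets_per_follower is not None else g)
--          if isinstance(t, str) and t.strip()]
--         for g in selected
--     ]
--     groups = [g for g in cleaned if g]
--
--     # Flat layout of the would-be full text: (is_separator, text) pieces.
--     pieces: List[Tuple[bool, str]] = []
--     for i, g in enumerate(groups):
--         if i > 0:
--             pieces.append((True, fs))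
--         pieces.append((False, g[0]))
--         for t in g[1:]:
--             pieces.append((True, ts))
--             pieces.append((False, t))
--
--     if max_chars is None:
--         return "".join(text for _, text in pieces).strip()
--
--     # Arithmetic scan: first overflowing piece decides everything — a
--     # separator cuts at its own start, a tweet cuts at max_chars itself.
--     end = 0
--     j = len(pieces)
--     cut = None
--     for idx, (is_sep, text) in enumerate(pieces):
--         if end + len(text) > max_chars:
--             j = idx
--             cut = end if is_sep else (max_chars if max_chars > end else end)
--             break
--         end += len(text)
--     if cut is None:
--         cut = end
--
--     return "".join(text for _, text in pieces[:j + 1])[:cut].strip()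
-- ===== Notes on version B (the rewrite author's own statement) =====
-- stated objective: alternative
-- what changed: B never maintains A's budget-tracked parts buffer with its three early exits: it flattens the groups to a (is_separator, text) piece layout, finds the cut index and offset by a pure length-arithmetic scan, and assembles the result with one join and one slice.
import Mathlib
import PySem

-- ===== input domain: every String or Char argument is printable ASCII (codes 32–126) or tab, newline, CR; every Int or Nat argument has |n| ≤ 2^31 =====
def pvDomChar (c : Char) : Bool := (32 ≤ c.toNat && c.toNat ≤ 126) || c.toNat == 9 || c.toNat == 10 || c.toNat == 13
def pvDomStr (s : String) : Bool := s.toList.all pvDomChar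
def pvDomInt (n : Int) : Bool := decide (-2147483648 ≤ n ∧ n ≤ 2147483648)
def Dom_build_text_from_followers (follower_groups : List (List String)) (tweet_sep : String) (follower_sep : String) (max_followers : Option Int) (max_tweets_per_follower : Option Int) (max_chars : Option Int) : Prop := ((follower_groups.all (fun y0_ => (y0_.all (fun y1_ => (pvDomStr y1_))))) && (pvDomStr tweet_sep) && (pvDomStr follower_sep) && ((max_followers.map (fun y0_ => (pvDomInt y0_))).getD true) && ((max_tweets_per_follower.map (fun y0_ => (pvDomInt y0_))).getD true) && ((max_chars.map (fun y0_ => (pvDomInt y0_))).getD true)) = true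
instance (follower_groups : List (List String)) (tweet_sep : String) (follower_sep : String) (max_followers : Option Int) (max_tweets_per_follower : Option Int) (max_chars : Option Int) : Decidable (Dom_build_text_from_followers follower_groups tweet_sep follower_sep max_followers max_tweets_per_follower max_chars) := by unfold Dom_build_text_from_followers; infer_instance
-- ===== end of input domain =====

-- B replaces A's budget-tracked incremental buffer (three early exits, truncation inline) by
-- measure-then-assemble: flatten to (is_separator, text) pieces, find the cut index and offset
-- by length arithmetic alone, then one join + one slice (alternative decomposition, same value).

-- ===== PORT A =====
-- inner 'for tweet_idx, tweet in enumerate(clean_tweets)' loop; third component = early return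
def pvA_inner (tweet_sep : String) (max_chars : Option Int) :
    List (Int × String) → List String → Int → (List String × Int × Bool)
  | [], parts, cur => (parts, cur, false)
  | (i, t) :: rest, parts, cur =>
    if i > 0 then
      let sep := " " ++ tweet_sep ++ " "
      match max_chars with
      | some m =>
        if cur + PySem.Str.len sep > m then (parts, cur, true)
        else
          let parts := parts ++ [sep]
          let cur := cur + PySem.Str.len sep
          if cur + PySem.Str.len t > m then
            let remaining := m - cur
            (if remaining > 0 then parts ++ [PySem.Str.slice t none (some remaining)] else parts, cur, true)
          else pvA_inner tweet_sep max_chars rest (parts ++ [t]) (cur + PySem.Str.len t)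
      | none => pvA_inner tweet_sep max_chars rest (parts ++ [sep] ++ [t]) (cur + PySem.Str.len sep + PySem.Str.len t)
    else
      match max_chars with
      | some m =>
        if cur + PySem.Str.len t > m then
          let remaining := m - cur
          (if remaining > 0 then parts ++ [PySem.Str.slice t none (some remaining)] else parts, cur, true)
        else pvA_inner tweet_sep max_chars rest (parts ++ [t]) (cur + PySem.Str.len t)
      | none => pvA_inner tweet_sep max_chars rest (parts ++ [t]) (cur + PySem.Str.len t)

-- outer 'for follower_idx, tweets in enumerate(selected_followers)' loop
def pvA_outer (tweet_sep follower_sep : String) (max_tweets_per_follower max_chars : Option Int) :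
    List (List String) → List String → Int → List String
  | [], parts, _ => parts
  | tweets :: rest, parts, cur =>
    let selected := match max_tweets_per_follower with
      | some k => PySem.List.slice tweets none (some k)
      | none => tweets
    let clean := selected.filter (fun t => PySem.Str.strip t != "")
    if clean.isEmpty then pvA_outer tweet_sep follower_sep max_tweets_per_follower max_chars rest parts cur
    else
      let withSep : Option (List String × Int) :=
        if !parts.isEmpty then
          let sep := " " ++ follower_sep ++ " "
          match max_chars with
          | some m =>
            if cur + PySem.Str.len sep > m then none   -- break
            else some (parts ++ [sep], cur + PySem.Str.len sep)
          | none => some (parts ++ [sep], cur + PySem.Str.len sep)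
        else some (parts, cur)
      match withSep with
      | none => parts
      | some (parts', cur') =>
        match pvA_inner tweet_sep max_chars (PySem.List.enumerate clean 0) parts' cur' with
        | (parts'', cur'', stopped) =>
          if stopped then parts''
          else pvA_outer tweet_sep follower_sep max_tweets_per_follower max_chars rest parts'' cur''

def build_text_from_followers (follower_groups : List (List String)) (tweet_sep : String) (follower_sep : String) (max_followers : Option Int) (max_tweets_per_follower : Option Int) (max_chars : Option Int) : String :=
  let selected_followers := match max_followers with
    | some k => PySem.List.slice follower_groups none (some k)
    | none => follower_groups
  PySem.Str.strip (PySem.Str.join "" (pvA_outer tweet_sep follower_sep max_tweets_per_follower max_chars selected_followers [] 0))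

-- ===== PORT B =====
-- flat layout pieces (is_separator, text) of one group: g[0] bare, later tweets preceded by ts
def pvB_piecesGroup (ts : String) : List String → List (Bool × String)
  | [] => []
  | t :: rest => (false, t) :: rest.flatMap (fun u => [(true, ts), (false, u)])

-- 'for i, g in enumerate(groups): if i > 0: …' — first group without the follower sep
def pvB_pieces (fs ts : String) : List (List String) → List (Bool × String)
  | [] => []
  | g :: rest => pvB_piecesGroup ts g ++ rest.flatMap (fun g' => (true, fs) :: pvB_piecesGroup ts g')

-- arithmetic scan: returns (index j of the first overflowing piece, cut offset);
-- without overflow j = len(pieces) (counted structurally) and cut = total length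
def pvB_scan (m : Int) : List (Bool × String) → Int → (Nat × Int)
  | [], e => (0, e)
  | (isSep, text) :: rest, e =>
    if e + PySem.Str.len text > m then
      (0, if isSep then e else if m > e then m else e)
    else
      let r := pvB_scan m rest (e + PySem.Str.len text)
      (r.1 + 1, r.2)

def build_text_from_followers_alt (follower_groups : List (List String)) (tweet_sep : String) (follower_sep : String) (max_followers : Option Int) (max_tweets_per_follower : Option Int) (max_chars : Option Int) : String :=
  let fs := " " ++ follower_sep ++ " "
  let ts := " " ++ tweet_sep ++ " "
  let selected := match max_followers with
    | some k => PySem.List.slice follower_groups none (some k)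
    | none => follower_groups
  let cleaned := selected.map (fun g =>
    (match max_tweets_per_follower with
      | some k => PySem.List.slice g none (some k)
      | none => g).filter (fun t => PySem.Str.strip t != ""))
  let groups := cleaned.filter (fun g => !g.isEmpty)
  let pieces := pvB_pieces fs ts groups
  match max_chars with
  | none => PySem.Str.strip (PySem.Str.join "" (pieces.map Prod.snd))
  | some m =>
    let r := pvB_scan m pieces 0
    PySem.Str.strip (PySem.Str.slice (PySem.Str.join "" ((pieces.take (r.1 + 1)).map Prod.snd)) none (some r.2))

-- ===== PRECONDITION & SPEC =====
def Spec_build_text_from_followers (follower_groups : List (List String)) (tweet_sep : String) (follower_sep : String) (max_followers : Option Int) (max_tweets_per_follower : Option Int) (max_chars : Option Int) (out : String) : Prop := out = build_text_from_followers_alt follower_groups tweet_sep follower_sep max_followers max_tweets_per_follower max_chars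
instance (follower_groups : List (List String)) (tweet_sep : String) (follower_sep : String) (max_followers : Option Int) (max_tweets_per_follower : Option Int) (max_chars : Option Int) (out : String) : Decidable (Spec_build_text_from_followers follower_groups tweet_sep follower_sep max_followers max_tweets_per_follower max_chars out) := by unfold Spec_build_text_from_followers; infer_instance

-- ===== CLAIM (what is proved, stated in full; the proofs are below) =====
def Claim_equal_build_text_from_followers : Prop := ∀ (follower_groups : List (List String)) (tweet_sep : String) (follower_sep : String) (max_followers : Option Int) (max_tweets_per_follower : Option Int) (max_chars : Option Int), Dom_build_text_from_followers follower_groups tweet_sep follower_sep max_followers max_tweets_per_follower max_chars → Spec_build_text_from_followers follower_groups tweet_sep follower_sep max_followers max_tweets_per_follower max_chars (build_text_from_followers follower_groups tweet_sep follower_sep max_followers max_tweets_per_follower max_chars)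

-- ===== LEMMAS AND PROOFS =====

-- token stream built the way A walks the raw groups (cleaning inline, emitted flag)
def pvTokensE (ts fs : String) (mtpf : Option Int) : List (List String) → Bool → List (Bool × String)
  | [], _ => []
  | g :: rest, emitted =>
    let chosen := match mtpf with
      | some k => PySem.List.slice g none (some k)
      | none => g
    let clean := chosen.filter (fun t => PySem.Str.strip t != "")
    if clean.isEmpty then pvTokensE ts fs mtpf rest emitted
    else (if emitted then [(true, fs)] else []) ++ pvB_piecesGroup ts clean ++ pvTokensE ts fs mtpf rest true

-- proof-only stateful consumer (A's budgeted buffer as a fold over tokens)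
def pvCst (max_chars : Option Int) : List (Bool × String) → List String → Int → (List String × Int × Bool)
  | [], parts, cur => (parts, cur, false)
  | (isSep, text) :: rest, parts, cur =>
    match max_chars with
    | some m =>
      if cur + PySem.Str.len text > m then
        ((if isSep then parts
          else if m - cur > 0 then parts ++ [PySem.Str.slice text none (some (m - cur))] else parts), cur, true)
      else pvCst (some m) rest (parts ++ [text]) (cur + PySem.Str.len text)
    | none => pvCst none rest (parts ++ [text]) (cur + PySem.Str.len text)

theorem pvCst_append (mc : Option Int) (ts1 ts2 : List (Bool × String)) (p : List String) (c : Int) :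
    pvCst mc (ts1 ++ ts2) p c =
      (if (pvCst mc ts1 p c).2.2 = true then pvCst mc ts1 p c
       else pvCst mc ts2 (pvCst mc ts1 p c).1 (pvCst mc ts1 p c).2.1) := by
  induction ts1 generalizing p c with
  | nil => simp [pvCst]
  | cons hd tl ih =>
    obtain ⟨isSep, text⟩ := hd
    cases mc with
    | none => simp only [List.cons_append, pvCst]; exact ih _ _
    | some m =>
      simp only [List.cons_append, pvCst]
      by_cases h : c + PySem.Str.len text > m
      · rw [if_pos h, if_pos h]; simp
      · rw [if_neg h, if_neg h]; exact ih _ _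

-- pvCst only ever appends to parts
theorem pvCst_parts_prefix (mc : Option Int) (ts : List (Bool × String)) (p : List String) (c : Int) :
    ∃ q, (pvCst mc ts p c).1 = p ++ q := by
  induction ts generalizing p c with
  | nil => exact ⟨[], by simp [pvCst]⟩
  | cons hd tl ih =>
    obtain ⟨isSep, text⟩ := hd
    cases mc with
    | none =>
      obtain ⟨q, hq⟩ := ih (p ++ [text]) (c + PySem.Str.len text)
      exact ⟨[text] ++ q, by simp only [pvCst]; rw [hq]; simp⟩
    | some m =>
      by_cases h : c + PySem.Str.len text > m
      · by_cases hs : isSep = true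
        · refine ⟨[], ?_⟩; simp only [pvCst]; rw [if_pos h, if_pos hs]; simp
        · by_cases hr : m - c > 0
          · refine ⟨[PySem.Str.slice text none (some (m - c))], ?_⟩
            simp only [pvCst]; rw [if_pos h, if_neg hs, if_pos hr]
          · refine ⟨[], ?_⟩; simp only [pvCst]; rw [if_pos h, if_neg hs, if_neg hr]; simp
      · obtain ⟨q, hq⟩ := ih (p ++ [text]) (c + PySem.Str.len text)
        refine ⟨[text] ++ q, ?_⟩
        simp only [pvCst]; rw [if_neg h, hq]; simp

-- A's inner loop over enumerate(clean)[1:] equals pvCst on the sep/tweet token pairs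
theorem pvA_inner_tail_eq (tsep : String) (mc : Option Int) (rest : List String)
    (s : Int) (hs : 0 < s) (p : List String) (c : Int) :
    pvA_inner tsep mc (PySem.List.enumerate rest s) p c =
      pvCst mc (rest.flatMap (fun u => [(true, " " ++ tsep ++ " "), (false, u)])) p c := by
  induction rest generalizing s p c with
  | nil => simp [PySem.List.enumerate, pvA_inner, pvCst]
  | cons t tl ih =>
    have hstep : PySem.List.enumerate (t :: tl) s = (s, t) :: PySem.List.enumerate tl (s + 1) := by
      simp [PySem.List.enumerate]
    rw [hstep]
    cases mc with
    | none =>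
      simp only [pvA_inner, pvCst, List.flatMap_cons, List.cons_append, if_pos hs]
      exact ih (s + 1) (by omega) _ _
    | some m =>
      simp only [pvA_inner, pvCst, List.flatMap_cons, List.cons_append, if_pos hs]
      by_cases h1 : c + PySem.Str.len (" " ++ tsep ++ " ") > m
      · rw [if_pos h1, if_pos h1]; simp
      · rw [if_neg h1, if_neg h1]
        by_cases h2 : c + PySem.Str.len (" " ++ tsep ++ " ") + PySem.Str.len t > m
        · rw [if_pos h2, if_pos h2]; simp
        · rw [if_neg h2, if_neg h2]
          exact ih (s + 1) (by omega) _ _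

-- A's full inner loop equals pvCst on the group's token list
theorem pvA_inner_eq (tsep : String) (mc : Option Int) (clean : List String)
    (p : List String) (c : Int) :
    pvA_inner tsep mc (PySem.List.enumerate clean 0) p c =
      pvCst mc (pvB_piecesGroup (" " ++ tsep ++ " ") clean) p c := by
  cases clean with
  | nil => simp [PySem.List.enumerate, pvA_inner, pvB_piecesGroup, pvCst]
  | cons t tl =>
    have hstep : PySem.List.enumerate (t :: tl) (0 : Int) = ((0 : Int), t) :: PySem.List.enumerate tl 1 := by
      simp [PySem.List.enumerate]
    rw [hstep]
    cases mc with
    | none =>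
      simp only [pvA_inner, pvB_piecesGroup, pvCst, if_neg (by omega : ¬ ((0 : Int) > 0))]
      exact pvA_inner_tail_eq tsep none tl 1 (by omega) _ _
    | some m =>
      simp only [pvA_inner, pvB_piecesGroup, pvCst, if_neg (by omega : ¬ ((0 : Int) > 0))]
      by_cases h : c + PySem.Str.len t > m
      · rw [if_pos h, if_pos h]; simp
      · rw [if_neg h, if_neg h]
        exact pvA_inner_tail_eq tsep (some m) tl 1 (by omega) _ _

-- if a non-empty group was consumed to the end, parts is non-empty afterwards
theorem pvCst_group_nonempty (ts : String) (mc : Option Int) (t : String) (tl : List String)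
    (p : List String) (c : Int) (h : (pvCst mc (pvB_piecesGroup ts (t :: tl)) p c).2.2 = false) :
    (pvCst mc (pvB_piecesGroup ts (t :: tl)) p c).1 ≠ [] := by
  simp only [pvB_piecesGroup] at h ⊢
  cases mc with
  | none =>
    obtain ⟨q, hq⟩ := pvCst_parts_prefix none (tl.flatMap (fun u => [(true, ts), (false, u)])) (p ++ [t]) (c + PySem.Str.len t)
    simp only [pvCst] at hq ⊢
    rw [hq]; simp
  | some m =>
    by_cases hb : c + PySem.Str.len t > m
    · simp only [pvCst] at h; rw [if_pos hb] at h; simp at h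
    · obtain ⟨q, hq⟩ := pvCst_parts_prefix (some m) (tl.flatMap (fun u => [(true, ts), (false, u)])) (p ++ [t]) (c + PySem.Str.len t)
      simp only [pvCst] at hq ⊢
      rw [if_neg hb, hq]; simp

-- main loop correspondence: A's outer loop = consuming the token stream
theorem pvA_outer_eq (tsep fsep : String) (mtpf mc : Option Int) (gs : List (List String))
    (p : List String) (c : Int) :
    pvA_outer tsep fsep mtpf mc gs p c =
      (pvCst mc (pvTokensE (" " ++ tsep ++ " ") (" " ++ fsep ++ " ") mtpf gs (!p.isEmpty)) p c).1 := by
  induction gs generalizing p c with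
  | nil => simp [pvA_outer, pvTokensE, pvCst]
  | cons g rest ih =>
    simp only [pvA_outer, pvTokensE]
    set cl := (match mtpf with
      | some k => PySem.List.slice g none (some k)
      | none => g).filter (fun t => PySem.Str.strip t != "") with hcl
    by_cases hce : cl.isEmpty
    · rw [if_pos hce, if_pos hce]; exact ih p c
    · rw [if_neg hce, if_neg hce]
      obtain ⟨t, tl, hct⟩ : ∃ t tl, cl = t :: tl := by
        cases hc : cl with
        | nil => rw [hc] at hce; simp at hce
        | cons a b => exact ⟨a, b, rfl⟩
      by_cases hp : p.isEmpty
      · rw [hp]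
        simp only [Bool.not_true, Bool.false_eq_true, if_false, List.nil_append]
        rw [pvA_inner_eq, pvCst_append]
        rcases hR : pvCst mc (pvB_piecesGroup (" " ++ tsep ++ " ") cl) p c with ⟨a, b, st⟩
        cases st with
        | true => simp
        | false =>
          simp only [Bool.false_eq_true, if_false]
          have ha : a ≠ [] := by
            have := pvCst_group_nonempty (" " ++ tsep ++ " ") mc t tl p c (by rw [← hct, hR])
            rw [← hct, hR] at this; exact this
          have ha' : (!a.isEmpty) = true := by simp [ha]
          rw [ih a b, ha']
      · have hp' : (!p.isEmpty) = true := by simp_all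
        rw [hp']
        simp only [if_true, List.singleton_append]
        cases mc with
        | none =>
          simp only [pvCst, List.cons_append]
          rw [pvCst_append]
          rcases hR : pvCst none (pvB_piecesGroup (" " ++ tsep ++ " ") cl) (p ++ [" " ++ fsep ++ " "]) (c + PySem.Str.len (" " ++ fsep ++ " ")) with ⟨a, b, st⟩
          dsimp only
          rw [pvA_inner_eq, hR]
          cases st with
          | true => simp
          | false =>
            simp only [Bool.false_eq_true, if_false]
            have ha : a ≠ [] := by
              have := pvCst_group_nonempty (" " ++ tsep ++ " ") none t tl (p ++ [" " ++ fsep ++ " "]) (c + PySem.Str.len (" " ++ fsep ++ " ")) (by rw [← hct, hR])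
              rw [← hct, hR] at this; exact this
            have ha' : (!a.isEmpty) = true := by simp [ha]
            rw [ih a b, ha']
        | some m =>
          by_cases hsep : c + PySem.Str.len (" " ++ fsep ++ " ") > m
          · simp only [pvCst, List.cons_append]
            rw [if_pos hsep, if_pos hsep]
            simp
          · simp only [pvCst, List.cons_append]
            rw [if_neg hsep, if_neg hsep]
            rw [pvCst_append]
            rcases hR : pvCst (some m) (pvB_piecesGroup (" " ++ tsep ++ " ") cl) (p ++ [" " ++ fsep ++ " "]) (c + PySem.Str.len (" " ++ fsep ++ " ")) with ⟨a, b, st⟩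
            dsimp only
            rw [pvA_inner_eq, hR]
            cases st with
            | true => simp
            | false =>
              simp only [Bool.false_eq_true, if_false]
              have ha : a ≠ [] := by
                have := pvCst_group_nonempty (" " ++ tsep ++ " ") (some m) t tl (p ++ [" " ++ fsep ++ " "]) (c + PySem.Str.len (" " ++ fsep ++ " ")) (by rw [← hct, hR])
                rw [← hct, hR] at this; exact this
              have ha' : (!a.isEmpty) = true := by simp [ha]
              rw [ih a b, ha']

-- the emitted-flag token builder over raw groups = the flat builder over the cleaned groups
theorem pvTokensE_true (ts fs : String) (mtpf : Option Int) (gs : List (List String)) :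
    pvTokensE ts fs mtpf gs true =
      ((gs.map (fun g =>
        (match mtpf with
          | some k => PySem.List.slice g none (some k)
          | none => g).filter (fun t => PySem.Str.strip t != ""))).filter (fun g => !g.isEmpty)).flatMap
        (fun g' => (true, fs) :: pvB_piecesGroup ts g') := by
  induction gs with
  | nil => simp [pvTokensE]
  | cons g rest ih =>
    simp only [pvTokensE, List.map_cons, List.filter_cons]
    by_cases hce : ((match mtpf with
      | some k => PySem.List.slice g none (some k)
      | none => g).filter (fun t => PySem.Str.strip t != "")).isEmpty
    · rw [if_pos hce]
      have : (!((match mtpf with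
        | some k => PySem.List.slice g none (some k)
        | none => g).filter (fun t => PySem.Str.strip t != "")).isEmpty) = false := by
        simp [hce]
      rw [this, if_neg (by simp)]
      exact ih
    · rw [if_neg hce]
      have : (!((match mtpf with
        | some k => PySem.List.slice g none (some k)
        | none => g).filter (fun t => PySem.Str.strip t != "")).isEmpty) = true := by
        simp_all
      rw [if_pos this, List.flatMap_cons, ih]
      simp

theorem pvTokensE_false (ts fs : String) (mtpf : Option Int) (gs : List (List String)) :
    pvTokensE ts fs mtpf gs false =
      pvB_pieces fs ts ((gs.map (fun g =>
        (match mtpf with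
          | some k => PySem.List.slice g none (some k)
          | none => g).filter (fun t => PySem.Str.strip t != ""))).filter (fun g => !g.isEmpty)) := by
  induction gs with
  | nil => simp [pvTokensE, pvB_pieces]
  | cons g rest ih =>
    simp only [pvTokensE, List.map_cons, List.filter_cons]
    by_cases hce : ((match mtpf with
      | some k => PySem.List.slice g none (some k)
      | none => g).filter (fun t => PySem.Str.strip t != "")).isEmpty
    · rw [if_pos hce]
      have : (!((match mtpf with
        | some k => PySem.List.slice g none (some k)
        | none => g).filter (fun t => PySem.Str.strip t != "")).isEmpty) = false := by
        simp [hce]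
      rw [this, if_neg (by simp)]
      exact ih
    · rw [if_neg hce]
      have : (!((match mtpf with
        | some k => PySem.List.slice g none (some k)
        | none => g).filter (fun t => PySem.Str.strip t != "")).isEmpty) = true := by
        simp_all
      rw [if_pos this, pvB_pieces, pvTokensE_true]
      simp

-- no limit: the consumer keeps every token
theorem pvCst_none (ts : List (Bool × String)) (p : List String) (c : Int) :
    (pvCst none ts p c).1 = p ++ ts.map Prod.snd := by
  induction ts generalizing p c with
  | nil => simp [pvCst]
  | cons hd tl ih =>
    obtain ⟨isSep, text⟩ := hd
    simp only [pvCst, List.map_cons]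
    rw [ih]; simp

-- the cut offset never moves backwards
theorem pvB_scan_ge (m : Int) (T : List (Bool × String)) (e : Int) : e ≤ (pvB_scan m T e).2 := by
  induction T generalizing e with
  | nil => simp [pvB_scan]
  | cons hd tl ih =>
    obtain ⟨isSep, text⟩ := hd
    have hl : (0 : Int) ≤ PySem.Str.len text := by rw [PySem.Str.len_eq]; positivity
    simp only [pvB_scan]
    by_cases hov : e + PySem.Str.len text > m
    · rw [if_pos hov]
      cases isSep with
      | true => simp
      | false =>
        simp only [Bool.false_eq_true, if_false]
        by_cases hm : m > e
        · simp only [if_pos hm]; omega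
        · simp only [if_neg hm]; omega
    · rw [if_neg hov]
      have := ih (e + PySem.Str.len text)
      simp only []
      omega

-- core: the budgeted buffer, flattened to characters, is the take-at-cut prefix of the kept pieces
theorem pvCst_chars (m : Int) (T : List (Bool × String)) (p : List String) (c : Int) :
    ((pvCst (some m) T p c).1.flatMap String.toList) =
      p.flatMap String.toList ++
        List.take ((pvB_scan m T c).2 - c).toNat
          ((T.take ((pvB_scan m T c).1 + 1)).flatMap (fun bt => bt.2.toList)) := by
  induction T generalizing p c with
  | nil => simp [pvCst, pvB_scan]
  | cons hd tl ih =>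
    obtain ⟨isSep, text⟩ := hd
    simp only [pvCst, pvB_scan]
    by_cases hov : c + PySem.Str.len text > m
    · rw [if_pos hov, if_pos hov]
      cases isSep with
      | true => simp
      | false =>
        simp only [Bool.false_eq_true, if_false]
        by_cases hm : m > c
        · rw [if_pos hm, if_pos (by omega : m - c > 0)]
          have hlen : PySem.Str.len text = (text.toList.length : Int) := PySem.Str.len_eq text
          simp only [List.take_succ_cons, List.take_zero, List.flatMap_cons, List.flatMap_nil,
            List.append_nil, List.flatMap_append]
          congr 1
          rw [PySem.Str.toList_slice]
          simp only [PySem.Chars.slice_eq_listSlice]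
          exact PySem.List.slice_to text.toList (by omega)
        · rw [if_neg hm, if_neg (by omega : ¬ (m - c > 0))]
          simp
    · rw [if_neg hov, if_neg hov]
      rw [ih]
      have hlen : PySem.Str.len text = (text.toList.length : Int) := PySem.Str.len_eq text
      have hge : c + PySem.Str.len text ≤ (pvB_scan m tl (c + PySem.Str.len text)).2 :=
        pvB_scan_ge m tl (c + PySem.Str.len text)
      simp only [List.take_succ_cons, List.flatMap_cons, List.flatMap_append]
      rw [List.take_append]
      rw [List.take_of_length_le (by omega : text.toList.length ≤ ((pvB_scan m tl (c + PySem.Str.len text)).2 - c).toNat)]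
      have harg : ((pvB_scan m tl (c + PySem.Str.len text)).2 - (c + PySem.Str.len text)).toNat = ((pvB_scan m tl (c + PySem.Str.len text)).2 - c).toNat - text.toList.length := by omega
      rw [harg, List.append_assoc]
      simp

-- ''.join = flatten, at the character level
theorem pvJoin_empty_chars (parts : List String) :
    (PySem.Str.join "" parts).toList = parts.flatMap String.toList := by
  cases parts with
  | nil => simp [PySem.Str.toList_join, PySem.Chars.join_nil]
  | cons a rest =>
    induction rest generalizing a with
    | nil => simp [PySem.Str.toList_join, PySem.Chars.join_singleton]
    | cons b r ih =>
      have h1 : (PySem.Str.join "" (a :: b :: r)).toList =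
          a.toList ++ ("" : String).toList ++ (PySem.Str.join "" (b :: r)).toList := by
        simp [PySem.Str.toList_join, PySem.Chars.join_cons_cons]
      rw [h1, ih b]
      simp

-- ===== VERDICT (by name: the statement is the Claim_ definition above) =====
theorem build_text_from_followers_spec : Claim_equal_build_text_from_followers := by
  intro fg tsep fsep mf mtpf mc _
  unfold Spec_build_text_from_followers
  simp only [build_text_from_followers, build_text_from_followers_alt]
  rw [pvA_outer_eq]
  have hflag : (!(List.isEmpty ([] : List String))) = false := by simp
  rw [hflag, pvTokensE_false]
  set sel := (match mf with
    | some k => PySem.List.slice fg none (some k)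
    | none => fg) with hsel
  set groups := ((sel.map (fun g =>
    (match mtpf with
      | some k => PySem.List.slice g none (some k)
      | none => g).filter (fun t => PySem.Str.strip t != ""))).filter (fun g => !g.isEmpty)) with hgroups
  set T := pvB_pieces (" " ++ fsep ++ " ") (" " ++ tsep ++ " ") groups with hT
  cases mc with
  | none =>
    congr 1
    apply String.toList_inj.mp
    rw [pvJoin_empty_chars, pvCst_none, pvJoin_empty_chars]
    simp [List.flatMap_map]
  | some m =>
    congr 1
    apply String.toList_inj.mp
    rw [pvJoin_empty_chars, pvCst_chars]
    rw [PySem.Str.toList_slice]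
    simp only [PySem.Chars.slice_eq_listSlice]
    have hcut0 : (0 : Int) ≤ (pvB_scan m T 0).2 := pvB_scan_ge m T 0
    rw [PySem.List.slice_to _ hcut0]
    rw [pvJoin_empty_chars]
    simp only [List.flatMap_nil, List.nil_append, Int.sub_zero]
    rw [List.flatMap_map]
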